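-- pv_equiv track=rewrite | github.com/ericzundel/mvn2pants | test/python/squarepants_test/test_generate_3rdparty.py | _get_sanitized_blocks
-- ===== SOURCE A (Python) =====
-- def _get_sanitized_blocks(text):
--   """Strip leading/trailing whitespace, empty lines, and line comments."""
--   lines = text.split('\n')
--   lines = (line[:line.rfind('#')] for line in lines)
--   lines = (line.strip() for line in lines)
--   current_block = []
--   for line in lines:
--     if line:
--       current_block.append(line)
--     elif current_block:
--       yield '\n'.join(current_block)
--       current_block = []
--   if current_block:
--     yield '\n'.join(current_block)
-- ===== SOURCE B (Python) =====
-- def _get_sanitized_blocks(text):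
--   """Strip leading/trailing whitespace, empty lines, and line comments."""
--   sanitized = [line[:line.rfind('#')].strip() for line in text.split('\n')]
--   n = len(sanitized)
--   i = 0
--   while i < n:
--     if sanitized[i]:
--       j = i
--       while j < n and sanitized[j]:
--         j += 1
--       yield '\n'.join(sanitized[i:j])
--       i = j
--     else:
--       i += 1
-- ===== Notes on version B (the rewrite author's own statement) =====
-- stated objective: alternative
-- what changed: B materializes the sanitized lines once and emits blocks by scanning runs of non-empty lines with two indices (i/j) and slicing, instead of A's streaming accumulator that flushes on blank lines and needs a trailing flush.
import Mathlib
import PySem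

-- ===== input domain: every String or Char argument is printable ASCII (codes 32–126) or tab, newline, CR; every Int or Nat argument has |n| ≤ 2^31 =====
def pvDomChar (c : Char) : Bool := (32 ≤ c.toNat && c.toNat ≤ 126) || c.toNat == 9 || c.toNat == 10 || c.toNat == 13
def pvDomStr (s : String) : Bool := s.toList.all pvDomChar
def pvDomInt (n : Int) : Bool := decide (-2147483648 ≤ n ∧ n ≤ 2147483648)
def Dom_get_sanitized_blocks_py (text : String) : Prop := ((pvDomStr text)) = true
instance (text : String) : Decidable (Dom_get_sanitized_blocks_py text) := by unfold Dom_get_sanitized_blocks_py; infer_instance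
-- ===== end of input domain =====

-- B replaces A's accumulator-and-flush loop by a run-scan over the precomputed sanitized lines (alternative decomposition, same cost).

-- line[:line.rfind('#')].strip()  (shared per-line sanitization; both Pythons contain this expression verbatim)
def pvSanitize (line : String) : String :=
  PySem.Str.strip (PySem.Str.slice line none (some (PySem.Str.rfind line "#")))

-- ===== PORT A =====
def get_sanitized_blocks_py (text : String) : List String :=
  let lines := ((PySem.Str.split? text "\n").getD []).map pvSanitize  -- sep "\n" ≠ "", split? is always some
  let p := lines.foldl
    (fun (acc : List String × List String) line =>
      if line ≠ "" then (acc.1, acc.2 ++ [line])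
      else if acc.2 ≠ [] then (acc.1 ++ [PySem.Str.join "\n" acc.2], [])
      else acc)
    ([], [])
  if p.2 ≠ [] then p.1 ++ [PySem.Str.join "\n" p.2] else p.1

-- ===== PORT B =====
-- the inner 'while j < n and sanitized[j]' of Source B: splits off the maximal leading run of non-empty lines
def pvTakeRun : List String → List String × List String
  | [] => ([], [])
  | l :: rest =>
    if l ≠ "" then
      let pr := pvTakeRun rest
      (l :: pr.1, pr.2)
    else ([], l :: rest)

theorem pvTakeRun_snd_length_le (ls : List String) : (pvTakeRun ls).2.length ≤ ls.length := by
  induction ls with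
  | nil => simp [pvTakeRun]
  | cons l rest ih =>
    simp only [pvTakeRun]
    split
    · exact Nat.le_succ_of_le ih
    · simp

-- the outer 'while i < n' of Source B over the remaining lines
def pvRunScan : List String → List String
  | [] => []
  | l :: rest =>
    if l = "" then pvRunScan rest
    else
      let pr := pvTakeRun (l :: rest)
      PySem.Str.join "\n" pr.1 :: pvRunScan pr.2
termination_by ls => ls.length
decreasing_by
  all_goals simp_all [pvTakeRun]
  exact pvTakeRun_snd_length_le rest


def get_sanitized_blocks_py_alt (text : String) : List String :=
  pvRunScan (((PySem.Str.split? text "\n").getD []).map pvSanitize)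

-- ===== PRECONDITION & SPEC =====
def Spec_get_sanitized_blocks_py (text : String) (out : List String) : Prop := out = get_sanitized_blocks_py_alt text
instance (text : String) (out : List String) : Decidable (Spec_get_sanitized_blocks_py text out) := by unfold Spec_get_sanitized_blocks_py; infer_instance

-- ===== CLAIM (what is proved, stated in full; the proofs are below) =====
def Claim_equal_get_sanitized_blocks_py : Prop := ∀ (text : String), Dom_get_sanitized_blocks_py text → Spec_get_sanitized_blocks_py text (get_sanitized_blocks_py text)

-- ===== LEMMAS AND PROOFS =====

-- named forms of A's loop body and trailing flush (for rewriting)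
def pvAStep (acc : List String × List String) (line : String) : List String × List String :=
  if line ≠ "" then (acc.1, acc.2 ++ [line])
  else if acc.2 ≠ [] then (acc.1 ++ [PySem.Str.join "\n" acc.2], [])
  else acc

def pvAFin (p : List String × List String) : List String :=
  if p.2 ≠ [] then p.1 ++ [PySem.Str.join "\n" p.2] else p.1

-- reference semantics: blocks of `ls` given pending (already accumulated) lines `cur`
def pvBlocks (cur : List String) : List String → List String
  | [] => if cur ≠ [] then [PySem.Str.join "\n" cur] else []
  | l :: ls =>
    if l ≠ "" then pvBlocks (cur ++ [l]) ls
    else if cur ≠ [] then PySem.Str.join "\n" cur :: pvBlocks [] ls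
    else pvBlocks [] ls

theorem pvFold_eq_blocks (ls : List String) (out cur : List String) :
    pvAFin (ls.foldl pvAStep (out, cur)) = out ++ pvBlocks cur ls := by
  induction ls generalizing out cur with
  | nil =>
    simp only [List.foldl_nil, pvBlocks, pvAFin]
    split <;> simp_all
  | cons l ls ih =>
    rw [List.foldl_cons]
    by_cases hl : l = ""
    · subst hl
      by_cases hc : cur = []
      · simp only [pvAStep, pvBlocks, hc]
        simpa using ih out []
      · simp only [pvAStep, pvBlocks, hc, ne_eq, not_false_eq_true, if_neg, if_pos,
          not_true_eq_false]
        rw [ih]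
        simp
    · simp only [pvAStep, pvBlocks, hl, ne_eq, not_false_eq_true, if_pos]
      exact ih out (cur ++ [l])

theorem pvBlocks_run (ls : List String) (cur : List String) (hc : cur ≠ []) :
    pvBlocks cur ls =
      PySem.Str.join "\n" (cur ++ (pvTakeRun ls).1) :: pvBlocks [] (pvTakeRun ls).2 := by
  induction ls generalizing cur with
  | nil => simp [pvBlocks, pvTakeRun, hc]
  | cons l ls ih =>
    by_cases hl : l = ""
    · subst hl
      simp [pvBlocks, pvTakeRun, hc]
    · simp only [pvBlocks, pvTakeRun, hl, ne_eq, not_false_eq_true, if_pos]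
      rw [ih (cur ++ [l]) (by simp)]
      simp [List.append_assoc]

theorem pvRunScan_eq_blocks_len (n : Nat) : ∀ ls : List String, ls.length ≤ n → pvRunScan ls = pvBlocks [] ls := by
  induction n with
  | zero =>
    intro ls h
    have : ls = [] := List.eq_nil_of_length_eq_zero (Nat.le_zero.mp h)
    subst this
    rw [pvRunScan.eq_def]
    simp [pvBlocks]
  | succ n ih =>
    intro ls h
    match ls with
    | [] => rw [pvRunScan.eq_def]; simp [pvBlocks]
    | l :: rest =>
      by_cases hl : l = ""
      · subst hl
        rw [pvRunScan.eq_def]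
        simp only []
        rw [ih rest (by simpa using Nat.lt_succ_iff.mp (Nat.lt_of_lt_of_le (Nat.lt_succ_self _) h))]
        simp [pvBlocks]
      · rw [pvRunScan.eq_def]
        simp only [hl, if_neg, not_false_eq_true]
        have h1 : pvBlocks [] (l :: rest) = pvBlocks [l] rest := by
          simp [pvBlocks, hl]
        rw [h1, pvBlocks_run rest [l] (by simp)]
        have htr : pvTakeRun (l :: rest) = (l :: (pvTakeRun rest).1, (pvTakeRun rest).2) := by
          simp [pvTakeRun, hl]
        rw [htr]
        have hlen : (pvTakeRun rest).2.length ≤ n := by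
          have h2 := pvTakeRun_snd_length_le rest
          have h3 : rest.length + 1 ≤ n + 1 := by simpa using h
          omega
        rw [ih _ hlen]
        simp

theorem pvRunScan_eq_blocks (ls : List String) : pvRunScan ls = pvBlocks [] ls :=
  pvRunScan_eq_blocks_len ls.length ls (Nat.le_refl _)

-- ===== VERDICT (by name: the statement is the Claim_ definition above) =====
theorem get_sanitized_blocks_py_spec : Claim_equal_get_sanitized_blocks_py := by
  intro text _
  unfold Spec_get_sanitized_blocks_py get_sanitized_blocks_py get_sanitized_blocks_py_alt
  have hA : (let lines := ((PySem.Str.split? text "\n").getD []).map pvSanitize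
      let p := lines.foldl
        (fun (acc : List String × List String) line =>
          if line ≠ "" then (acc.1, acc.2 ++ [line])
          else if acc.2 ≠ [] then (acc.1 ++ [PySem.Str.join "\n" acc.2], [])
          else acc)
        ([], [])
      if p.2 ≠ [] then p.1 ++ [PySem.Str.join "\n" p.2] else p.1)
      = pvAFin ((((PySem.Str.split? text "\n").getD []).map pvSanitize).foldl pvAStep ([], [])) := rfl
  rw [hA, pvFold_eq_blocks, pvRunScan_eq_blocks]
  simp
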